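-- pv_equiv track=rewrite | github.com/toomzheng/dsc20 | homework/hw02/hw02.py | potential_ideas_for_business
-- ===== SOURCE A (Python) =====
-- def potential_ideas_for_business(items):
--     """
--     For each supplier, check the ingredients that they have. If they are not
--     in our products list, add them. If they are already, ignore them. Iterate
--     through this for each supplier and for each ingredient.
--
--     Parameters:
--         items (dict): A dictionary where keys are supplier names (strings) and
--         values are lists of ingredients (strings) provided by that supplier.
--
--     Returns:
--         list: An alphabetically sorted list of unique ingredients (strings)
--         from all suppliers.
--
--     >>> items = {'supplier 1': ['Tea', 'Peaches'], \
--     'supplier 2': ['Peaches', 'Apples', 'Cups']}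
--     >>> potential_ideas_for_business(items)
--     ['Apples', 'Cups', 'Peaches', 'Tea']
--
--     >>> items = {'supplier 1': ['Flour', 'Eggs', 'Chocolate', 'Milk'], \
--     'supplier 2': ['Milk', 'Eggs', 'Vanilla', 'Butter'], \
--     'supplier 3': ['Butter', 'Sugar']}
--     >>> potential_ideas_for_business(items)
--     ['Butter', 'Chocolate', 'Eggs', 'Flour', 'Milk', 'Sugar', 'Vanilla']
--
--     >>> items = {'supplier 1': [], 'supplier 2': []}
--     >>> potential_ideas_for_business(items)
--     []
--
--     >>> items = {'supplier 1': ['Salt'], 'supplier 2': ['Salt']}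
--     >>> potential_ideas_for_business(items)
--     ['Salt']
--
--     >>> items = {'supplier 1': [], 'supplier 2': ['Honey']}
--     >>> potential_ideas_for_business(items)
--     ['Honey']
--
--     >>> items = {}
--     >>> potential_ideas_for_business(items)
--     []
--     """
--     products=[]
--     for supplier in items:
--         i=0
--         while i<len(items[supplier]):
--             if items[supplier][i] not in products:
--                 products.append(items[supplier][i])
--             i+=1
--
--     return sorted(products)
-- ===== SOURCE B (Python) =====
-- def potential_ideas_for_business(items):
--     # Flatten all supplier ingredient lists (keeping duplicates), sort the
--     # flat list, then one linear pass removing adjacent duplicates.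
--     flat = []
--     for ingredients in items.values():
--         flat.extend(ingredients)
--     flat.sort()
--     result = []
--     for ing in flat:
--         if not result or result[-1] != ing:
--             result.append(ing)
--     return result
-- ===== Notes on version B (the rewrite author's own statement) =====
-- stated objective: faster
-- what changed: Instead of testing membership in the growing products list for every ingredient (quadratic), B concatenates all supplier lists keeping duplicates, sorts once, and removes adjacent duplicates in one linear pass.
import Mathlib
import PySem

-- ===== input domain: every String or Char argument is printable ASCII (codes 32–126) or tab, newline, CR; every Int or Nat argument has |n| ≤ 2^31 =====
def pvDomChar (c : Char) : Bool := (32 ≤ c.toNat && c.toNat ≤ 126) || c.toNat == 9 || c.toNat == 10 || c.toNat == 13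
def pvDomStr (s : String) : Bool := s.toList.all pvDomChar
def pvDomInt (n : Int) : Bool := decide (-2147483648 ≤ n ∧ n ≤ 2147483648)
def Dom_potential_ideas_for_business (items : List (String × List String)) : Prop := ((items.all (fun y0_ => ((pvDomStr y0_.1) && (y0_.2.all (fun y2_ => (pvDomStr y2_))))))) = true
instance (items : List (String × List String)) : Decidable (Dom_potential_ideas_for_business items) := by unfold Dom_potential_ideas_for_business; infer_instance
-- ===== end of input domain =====

-- B flattens all supplier lists, sorts once, and removes adjacent duplicates in one
-- linear pass, instead of A's membership test against the growing products list.


-- ===== PORT A =====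
-- 'for supplier in items' / 'while i < len(items[supplier])' walks every ingredient of
-- every supplier in order; the inner body 'if ing not in products: products.append(ing)'
-- is exactly PySem.Set.add.  Finally sorted(products).
def potential_ideas_for_business (items : List (String × List String)) : List String :=
  let products := items.foldl
    (fun products supplier =>
      supplier.2.foldl (fun products ing => PySem.Set.add products ing) products) []
  PySem.List.sorted products (fun x => x) false

-- ===== PORT B =====
-- flat accumulation by extend, one sort, then the adjacent-dedup pass with
-- 'if not result or result[-1] != ing: result.append(ing)'.
def potential_ideas_for_business_alt (items : List (String × List String)) : List String :=
  let flat := items.foldl (fun acc supplier => acc ++ supplier.2) []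
  let sortedFlat := PySem.List.sorted flat (fun x => x) false
  sortedFlat.foldl
    (fun result ing =>
      if result = [] ∨ result.getLast? ≠ some ing then result ++ [ing] else result) []

-- ===== PRECONDITION & SPEC =====
def Spec_potential_ideas_for_business (items : List (String × List String)) (out : List String) : Prop := out = potential_ideas_for_business_alt items
instance (items : List (String × List String)) (out : List String) : Decidable (Spec_potential_ideas_for_business items out) := by unfold Spec_potential_ideas_for_business; infer_instance

-- ===== CLAIM (what is proved, stated in full; the proofs are below) =====
def Claim_equal_potential_ideas_for_business : Prop := ∀ (items : List (String × List String)), Dom_potential_ideas_for_business items → Spec_potential_ideas_for_business items (potential_ideas_for_business items)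

-- ===== LEMMAS AND PROOFS =====

-- A's nested fold builds set(flatten(values)) in first-occurrence order.
lemma pibA_products_eq (items : List (String × List String)) (s : PySem.Set String) :
    items.foldl (fun products supplier =>
      supplier.2.foldl (fun products ing => PySem.Set.add products ing) products) s
      = (items.flatMap (·.2)).foldl PySem.Set.add s := by
  induction items generalizing s with
  | nil => rfl
  | cons p t ih => simp [List.foldl_append, ih]

-- In a strictly increasing list the last element bounds every member.
lemma le_getLast?_of_pairwise_lt (l : List String) (m : String)
    (hp : l.Pairwise (· < ·)) (hm : l.getLast? = some m) :
    ∀ a ∈ l, a ≤ m := by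
  induction l with
  | nil => simp at hm
  | cons x t ih =>
    rcases List.pairwise_cons.mp hp with ⟨hx, ht⟩
    intro a ha
    cases t with
    | nil =>
      simp at hm ha; simp [ha, hm]
    | cons y u =>
      rw [List.getLast?_cons_cons] at hm
      rcases List.mem_cons.mp ha with rfl | ha'
      · exact le_of_lt (lt_of_lt_of_le (hx y (by simp))
          (ih ht hm y (by simp)))
      · exact ih ht hm a ha'

-- Invariant of B's adjacent-dedup pass over a sorted tail.
lemma pibB_dedup_invariant (l : List String) :
    ∀ (acc : List String), acc.Pairwise (· < ·) →
      (∀ a ∈ acc, ∀ b ∈ l, a ≤ b) → l.Pairwise (· ≤ ·) →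
      (l.foldl (fun result ing =>
          if result = [] ∨ result.getLast? ≠ some ing then result ++ [ing] else result)
        acc).Pairwise (· < ·) ∧
      (∀ x, x ∈ l.foldl (fun result ing =>
          if result = [] ∨ result.getLast? ≠ some ing then result ++ [ing] else result)
        acc ↔ x ∈ acc ∨ x ∈ l) := by
  induction l with
  | nil => intro acc hp _ _; exact ⟨hp, by simp⟩
  | cons x t ih =>
    intro acc hp hle hsorted
    rcases List.pairwise_cons.mp hsorted with ⟨hxt, ht⟩
    by_cases hc : acc = [] ∨ acc.getLast? ≠ some x
    · -- append branch
      have hacc_lt_x : ∀ a ∈ acc, a < x := by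
        intro a ha
        have hax : a ≤ x := hle a ha x (by simp)
        rcases lt_or_eq_of_le hax with h | rfl
        · exact h
        · -- a = x : then the last element m satisfies a ≤ m and m ≤ x = a, so m = x
          exfalso
          rcases hc with hnil | hne
          · simp [hnil] at ha
          · have hne' : acc ≠ [] := by rintro rfl; simp at ha
            obtain ⟨m, hm⟩ := Option.isSome_iff_exists.mp
              (List.getLast?_isSome.mpr hne')
            have h1 : a ≤ m := le_getLast?_of_pairwise_lt acc m hp hm a ha
            have h2 : m ≤ a := hle m (List.mem_of_getLast? hm) a (by simp)
            exact hne (by rw [hm, le_antisymm h2 h1])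
      have hp' : (acc ++ [x]).Pairwise (· < ·) := by
        rw [List.pairwise_append]
        exact ⟨hp, by simp, by intro a ha b hb; simp at hb; subst hb; exact hacc_lt_x a ha⟩
      have hle' : ∀ a ∈ acc ++ [x], ∀ b ∈ t, a ≤ b := by
        intro a ha b hb
        rcases List.mem_append.mp ha with h | h
        · exact hle a h b (by simp [hb])
        · simp at h; subst h; exact hxt b hb
      obtain ⟨h1, h2⟩ := ih (acc ++ [x]) hp' hle' ht
      refine ⟨by simpa [hc] using h1, ?_⟩
      intro y
      rw [List.foldl_cons, if_pos hc]
      rw [h2 y]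
      simp [or_assoc, or_comm, or_left_comm]
    · -- skip branch: last of acc is already x
      push Not at hc
      rcases hc with ⟨hne, hlast⟩
      have hx_mem : x ∈ acc := List.mem_of_getLast? hlast
      have hle' : ∀ a ∈ acc, ∀ b ∈ t, a ≤ b := fun a ha b hb => hle a ha b (by simp [hb])
      obtain ⟨h1, h2⟩ := ih acc hp hle' ht
      have hcond : ¬ (acc = [] ∨ acc.getLast? ≠ some x) := by
        push Not; exact ⟨hne, hlast⟩
      refine ⟨by simpa [hcond] using h1, ?_⟩
      intro y
      rw [List.foldl_cons, if_neg hcond, h2 y]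
      constructor
      · rintro (h | h)
        · exact Or.inl h
        · exact Or.inr (by simp [h])
      · rintro (h | h)
        · exact Or.inl h
        · rcases List.mem_cons.mp h with rfl | h'
          · exact Or.inl hx_mem
          · exact Or.inr h'

-- ===== VERDICT (by name: the statement is the Claim_ definition above) =====
theorem potential_ideas_for_business_spec : Claim_equal_potential_ideas_for_business := by
  intro items _
  unfold Spec_potential_ideas_for_business potential_ideas_for_business potential_ideas_for_business_alt
  simp only [pibA_products_eq]
  set flat := items.flatMap (·.2) with hflat
  have hBflat : items.foldl (fun acc supplier => acc ++ supplier.2) [] = flat := by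
    simpa using PySem.List.foldl_append_eq_flatMap (fun p : String × List String => p.2) items []
  rw [hBflat]
  have hofList : flat.foldl PySem.Set.add [] = PySem.Set.ofList flat :=
    (PySem.Set.ofList_eq_foldl flat).symm
  rw [hofList]
  -- B's result: strictly increasing, same members as flat
  obtain ⟨hBpair, hBmem⟩ :=
    pibB_dedup_invariant (PySem.List.sorted flat (fun x => x) false) []
      (by simp) (by simp) (by simpa using PySem.List.sorted_pairwise flat (fun x => x))
  set B := (PySem.List.sorted flat (fun x => x) false).foldl
    (fun result ing =>
      if result = [] ∨ result.getLast? ≠ some ing then result ++ [ing] else result) [] with hB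
  have hBnodup : B.Nodup := hBpair.imp ne_of_lt
  have hperm : B.Perm (PySem.Set.ofList flat) := by
    rw [List.perm_ext_iff_of_nodup hBnodup (PySem.Set.nodup_ofList flat)]
    intro a
    rw [hBmem a, PySem.Set.mem_ofList]
    simp [PySem.List.mem_sorted]
  exact PySem.List.sorted_eq_of_perm_of_pairwise_lt (PySem.Set.ofList flat) B (fun x => x) hperm hBpair
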